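-- pv_equiv track=rewrite | github.com/LTMullineux/adventofcode | 2021/day-09/part2-first-attempt.py | row_basin_generator
-- ===== SOURCE A (Python) =====
-- def row_basin_generator(row_idx, row, split=9):
--     row_basin, positions = [], set()
--     for col_idx, value in enumerate(row):
--         if value == split:
--             if row_basin:
--                 yield row_basin, positions
--             row_basin, positions = [], set()
--         else:
--             row_basin.append(value)
--             positions.add((row_idx, col_idx - 1))
--
--     if row_basin:
--         yield row_basin, positions
-- ===== SOURCE B (Python) =====
-- def row_basin_generator(row_idx, row, split=9):
--     # Recursive segment decomposition: skip split cells, peel off one maximal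
--     # non-split run at a time (take/drop), instead of A's accumulator scan.
--     def go(i, xs):
--         if not xs:
--             return
--         if xs[0] == split:
--             yield from go(i + 1, xs[1:])
--             return
--         seg = []
--         for v in xs:
--             if v == split:
--                 break
--             seg.append(v)
--         k = len(seg)
--         yield seg, {(row_idx, i + j - 1) for j in range(k)}
--         yield from go(i + k, xs[k:])
--     yield from go(0, row)
-- ===== Notes on version B (the rewrite author's own statement) =====
-- stated objective: alternative
-- what changed: Replaces A's single accumulator scan (mutable row_basin/positions reset at each split cell, with a trailing flush) by a recursive take/drop decomposition that skips split cells and peels off one maximal non-split run at a time, building each segment and its position set in one step with no flush logic.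
import Mathlib
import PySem

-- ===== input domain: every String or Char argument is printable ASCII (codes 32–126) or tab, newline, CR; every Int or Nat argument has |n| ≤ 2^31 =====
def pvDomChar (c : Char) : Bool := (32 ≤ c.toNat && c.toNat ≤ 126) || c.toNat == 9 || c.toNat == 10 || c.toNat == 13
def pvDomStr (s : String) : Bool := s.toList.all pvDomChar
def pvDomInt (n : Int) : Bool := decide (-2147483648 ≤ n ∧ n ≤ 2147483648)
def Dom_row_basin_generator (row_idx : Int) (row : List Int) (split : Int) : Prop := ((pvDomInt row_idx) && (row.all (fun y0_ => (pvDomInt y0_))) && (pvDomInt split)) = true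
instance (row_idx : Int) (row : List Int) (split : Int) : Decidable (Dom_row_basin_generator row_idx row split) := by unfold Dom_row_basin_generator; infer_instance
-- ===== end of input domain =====

-- B replaces A's accumulator-and-flush scan by a recursive take/drop segment decomposition (alternative, same cost).


-- ===== PORT A =====
-- A's for-loop over enumerate(row) with state (yielded list, row_basin, positions); the [] case is the trailing flush.
def pvALoop (row_idx split : Int) :
    List (Int × Int) → List (List Int × (List (Int × Int))) → List Int → List (Int × Int) →
    List (List Int × (List (Int × Int)))
  | [], out, rb, pos => if rb.isEmpty then out else out ++ [(rb, pos)]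
  | (col_idx, value) :: rest, out, rb, pos =>
    if value == split then
      pvALoop row_idx split rest (if rb.isEmpty then out else out ++ [(rb, pos)]) [] []
    else
      pvALoop row_idx split rest out (rb ++ [value]) (PySem.Set.add pos (row_idx, col_idx - 1))

def row_basin_generator (row_idx : Int) (row : List Int) (split : Int) : List (List Int × (List (Int × Int))) :=
  pvALoop row_idx split (PySem.List.enumerate row 0) [] [] []

-- ===== PORT B =====
-- Source B's recursive go(i, xs): skip a leading split cell, else peel the maximal non-split run (the for/break loop = takeWhile).
def pvBGo (row_idx split i : Int) (l : List Int) : List (List Int × (List (Int × Int))) :=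
  match l with
  | [] => []
  | x :: xs =>
    if x == split then pvBGo row_idx split (i + 1) xs
    else
      let seg := (x :: xs).takeWhile (fun v => !(v == split))
      (seg, PySem.Set.ofList ((PySem.List.pyRange 0 (seg.length : Int) 1).map (fun j => (row_idx, i + j - 1)))) ::
        pvBGo row_idx split (i + (seg.length : Int)) ((x :: xs).drop seg.length)
termination_by l.length
decreasing_by
  · simp
  · simp_all

def row_basin_generator_alt (row_idx : Int) (row : List Int) (split : Int) : List (List Int × (List (Int × Int))) :=
  pvBGo row_idx split 0 row

-- ===== PRECONDITION & SPEC =====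
def Spec_row_basin_generator (row_idx : Int) (row : List Int) (split : Int) (out : List (List Int × (List (Int × Int)))) : Prop := out = row_basin_generator_alt row_idx row split
instance (row_idx : Int) (row : List Int) (split : Int) (out : List (List Int × (List (Int × Int)))) : Decidable (Spec_row_basin_generator row_idx row split out) := by unfold Spec_row_basin_generator; infer_instance

-- ===== CLAIM (what is proved, stated in full; the proofs are below) =====
def Claim_equal_row_basin_generator : Prop := ∀ (row_idx : Int) (row : List Int) (split : Int), Dom_row_basin_generator row_idx row split → Spec_row_basin_generator row_idx row split (row_basin_generator row_idx row split)

-- ===== LEMMAS AND PROOFS =====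

-- the position set B builds for a segment of length k starting at column i is the plain list of its k pairs
lemma pvPosSet (ri i : Int) (k : Nat) :
    PySem.Set.ofList ((PySem.List.pyRange 0 (k : Int) 1).map (fun j => (ri, i + j - 1))) =
      (List.range k).map (fun j : Nat => (ri, i + j - 1)) := by
  have hr : PySem.List.pyRange 0 (k : Int) 1 = (List.range k).map (fun j : Nat => (j : Int)) := by
    rw [PySem.List.pyRange_one]
    simp
  rw [hr, List.map_map]
  have hinj : Function.Injective ((fun j : Int => (ri, i + j - 1)) ∘ (fun j : Nat => (j : Int))) := by
    intro a b h
    simp only [Function.comp, Prod.mk.injEq] at h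
    omega
  exact PySem.Set.ofList_eq_self_of_nodup _ (List.Nodup.map hinj List.nodup_range)

lemma pvPosShift (ri s : Int) (k : Nat) :
    (List.range (k + 1)).map (fun j : Nat => (ri, s + j - 1)) =
      (ri, s - 1) :: (List.range k).map (fun j : Nat => (ri, (s + 1) + j - 1)) := by
  rw [List.range_succ_eq_map, List.map_cons, List.map_map]
  congr 1
  · norm_num
  · apply List.map_congr_left
    intro j _
    simp only [Function.comp, Prod.mk.injEq, true_and]
    push_cast
    ring

lemma pvBGo_cons_split (ri sp i x : Int) (xs : List Int) (h : (x == sp) = true) :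
    pvBGo ri sp i (x :: xs) = pvBGo ri sp (i + 1) xs := by
  rw [pvBGo]
  simp [h]

lemma pvBGo_cons_seg (ri sp i x : Int) (xs : List Int) (h : (x == sp) = false) :
    pvBGo ri sp i (x :: xs) =
      ((x :: xs).takeWhile (fun v => !(v == sp)),
        (List.range ((x :: xs).takeWhile (fun v => !(v == sp))).length).map (fun j : Nat => (ri, i + j - 1))) ::
        pvBGo ri sp (i + (((x :: xs).takeWhile (fun v => !(v == sp))).length : Int))
          ((x :: xs).drop ((x :: xs).takeWhile (fun v => !(v == sp))).length) := by
  rw [pvBGo]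
  simp only [h, Bool.false_eq_true, if_false, pvPosSet]

-- main invariant: running A's loop from any state mid-row agrees with B's decomposition of the rest
lemma pvMain (ri sp : Int) (xs : List Int) :
    ∀ (s : Int) (out : List (List Int × (List (Int × Int)))) (rb : List Int) (pos : List (Int × Int)),
      (rb = [] → pos = []) → (∀ q ∈ pos, q.2 < s - 1) →
      pvALoop ri sp (PySem.List.enumerate xs s) out rb pos =
        out ++ (if rb.isEmpty then pvBGo ri sp s xs
                else
                  (rb ++ xs.takeWhile (fun v => !(v == sp)),
                    pos ++ (List.range (xs.takeWhile (fun v => !(v == sp))).length).map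
                      (fun j : Nat => (ri, s + j - 1))) ::
                    pvBGo ri sp (s + ((xs.takeWhile (fun v => !(v == sp))).length : Int))
                      (xs.drop (xs.takeWhile (fun v => !(v == sp))).length)) := by
  induction xs with
  | nil =>
    intro s out rb pos hrp hpos
    cases rb with
    | nil => simp [pvALoop, pvBGo]
    | cons r rs => simp [pvALoop, pvBGo]
  | cons x xs ih =>
    intro s out rb pos hrp hpos
    rw [PySem.List.enumerate_cons]
    by_cases hx : (x == sp) = true
    · rw [show pvALoop ri sp ((s, x) :: PySem.List.enumerate xs (s + 1)) out rb pos =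
            pvALoop ri sp (PySem.List.enumerate xs (s + 1))
              (if rb.isEmpty then out else out ++ [(rb, pos)]) [] [] from by
          rw [pvALoop]; simp [hx]]
      rw [ih (s + 1) _ [] [] (fun _ => rfl) (by simp)]
      cases rb with
      | nil => simp [pvBGo_cons_split ri sp s x xs hx]
      | cons r rs =>
        simp [hx, pvBGo_cons_split ri sp s x xs hx]
    · have hx' : (x == sp) = false := by simpa using hx
      have hadd : PySem.Set.add pos (ri, s - 1) = pos ++ [(ri, s - 1)] := by
        have hnm : (ri, s - 1) ∉ pos := fun hm => by have := hpos _ hm; omega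
        simp [PySem.Set.add, PySem.Set.contains, hnm]
      rw [show pvALoop ri sp ((s, x) :: PySem.List.enumerate xs (s + 1)) out rb pos =
            pvALoop ri sp (PySem.List.enumerate xs (s + 1)) out (rb ++ [x])
              (PySem.Set.add pos (ri, s - 1)) from by
          rw [pvALoop]; simp [hx']]
      rw [hadd]
      have hpos' : ∀ q ∈ pos ++ [(ri, s - 1)], q.2 < (s + 1) - 1 := by
        intro q hq
        rcases List.mem_append.mp hq with h | h
        · have := hpos _ h; omega
        · simp at h; subst h; omega
      rw [ih (s + 1) out (rb ++ [x]) _ (by simp) hpos']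
      have hTW : (x :: xs).takeWhile (fun v => !(v == sp)) = x :: xs.takeWhile (fun v => !(v == sp)) := by
        simp [hx']
      have hshift := pvPosShift ri s (xs.takeWhile (fun v => !(v == sp))).length
      cases rb with
      | nil =>
        have hp0 : pos = [] := hrp rfl
        subst hp0
        rw [pvBGo_cons_seg ri sp s x xs hx', hTW]
        simp only [List.isEmpty_cons, List.isEmpty_nil, List.nil_append, List.cons_append,
          List.length_cons, hshift, List.drop_succ_cons]
        push_cast
        ring_nf
      | cons r rs =>
        rw [hTW]
        simp only [List.isEmpty_cons, List.cons_append, List.length_cons, hshift,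
          List.drop_succ_cons, List.append_assoc]
        push_cast
        ring_nf
        simp

-- ===== VERDICT (by name: the statement is the Claim_ definition above) =====
theorem row_basin_generator_spec : Claim_equal_row_basin_generator := by
  intro ri row sp _
  unfold Spec_row_basin_generator row_basin_generator row_basin_generator_alt
  have h := pvMain ri sp row 0 [] [] [] (fun _ => rfl) (by simp)
  simpa using h
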